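-- pv_equiv track=rewrite | github.com/sadiehertzig/copylobsta | agents/main/skills/autoimprove-tbc/improver.py | _default_anchor
-- ===== SOURCE A (Python) =====
-- def _default_anchor(skill_content: str) -> str:
--     for line in skill_content.splitlines():
--         s = line.strip()
--         if s.startswith("## "):
--             return line
--     for line in skill_content.splitlines():
--         s = line.strip()
--         if s.startswith("# "):
--             return line
--     return ""
-- ===== SOURCE B (Python) =====
-- def _default_anchor(skill_content: str) -> str:
--     fallback = None
--     for line in skill_content.splitlines():
--         s = line.strip()
--         if s.startswith("## "):
--             return line
--         if fallback is None and s.startswith("# "):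
--             fallback = line
--     return fallback if fallback is not None else ""
-- ===== Notes on version B (the rewrite author's own statement) =====
-- stated objective: alternative
-- what changed: Replaces A's two independent full scans of the lines with a single pass that maintains a '# ' fallback while searching for the first '## ' line.
import Mathlib
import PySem

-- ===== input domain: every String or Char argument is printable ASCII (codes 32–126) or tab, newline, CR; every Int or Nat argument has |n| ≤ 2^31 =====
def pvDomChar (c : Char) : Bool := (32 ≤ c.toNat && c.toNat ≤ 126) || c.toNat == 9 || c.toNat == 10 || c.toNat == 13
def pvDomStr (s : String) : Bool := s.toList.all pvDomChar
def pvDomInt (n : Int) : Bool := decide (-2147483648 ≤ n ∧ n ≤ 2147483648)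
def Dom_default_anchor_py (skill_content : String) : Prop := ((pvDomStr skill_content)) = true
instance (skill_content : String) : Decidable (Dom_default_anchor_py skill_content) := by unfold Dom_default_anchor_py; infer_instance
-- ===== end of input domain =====

-- B merges A's two independent full scans into one pass carrying a '# ' fallback (alternative decomposition, same cost).

-- ===== PORT A =====
-- A's second loop: scan all lines for the first '# ' line, else ""
def pvLoop2 : List String → String
  | [] => ""
  | l :: ls => if PySem.Str.startswith (PySem.Str.strip l) "# " then l else pvLoop2 ls

-- A's first loop: scan for the first '## ' line; when exhausted, rescan ALL lines with the second loop
def pvLoop1 (all : List String) : List String → String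
  | [] => pvLoop2 all
  | l :: ls => if PySem.Str.startswith (PySem.Str.strip l) "## " then l else pvLoop1 all ls

def default_anchor_py (skill_content : String) : String :=
  let lines := PySem.Str.splitlines skill_content
  pvLoop1 lines lines

-- ===== PORT B =====
-- single pass with a fallback accumulator
def pvLoopB (fallback : Option String) : List String → String
  | [] => fallback.getD ""
  | l :: ls =>
    let s := PySem.Str.strip l
    if PySem.Str.startswith s "## " then l
    else if fallback.isNone && PySem.Str.startswith s "# " then pvLoopB (some l) ls
    else pvLoopB fallback ls

def default_anchor_py_alt (skill_content : String) : String :=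
  pvLoopB none (PySem.Str.splitlines skill_content)

-- ===== PRECONDITION & SPEC =====
def Spec_default_anchor_py (skill_content : String) (out : String) : Prop := out = default_anchor_py_alt skill_content
instance (skill_content : String) (out : String) : Decidable (Spec_default_anchor_py skill_content out) := by unfold Spec_default_anchor_py; infer_instance

-- ===== CLAIM (what is proved, stated in full; the proofs are below) =====
def Claim_equal_default_anchor_py : Prop := ∀ (skill_content : String), Dom_default_anchor_py skill_content → Spec_default_anchor_py skill_content (default_anchor_py skill_content)

-- ===== LEMMAS AND PROOFS =====

-- first line stripping to a '## ' prefix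
def pvFirstH2 : List String → Option String
  | [] => none
  | l :: ls => if PySem.Str.startswith (PySem.Str.strip l) "## " then some l else pvFirstH2 ls

theorem pvLoop1_eq (all : List String) : ∀ rest : List String,
    pvLoop1 all rest = ((pvFirstH2 rest).getD (pvLoop2 all)) := by
  intro rest
  induction rest with
  | nil => rfl
  | cons l ls ih =>
    simp only [pvLoop1, pvFirstH2]
    split_ifs with h <;> simp [ih]

theorem pvLoopB_eq : ∀ (ls : List String) (fallback : Option String),
    pvLoopB fallback ls = (pvFirstH2 ls).getD (fallback.getD (pvLoop2 ls)) := by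
  intro ls
  induction ls with
  | nil => intro fb; cases fb <;> rfl
  | cons l ls ih =>
    intro fb
    simp only [pvLoopB, pvFirstH2]
    by_cases h2 : PySem.Chars.startswith (PySem.Chars.strip l.toList) ['#', '#', ' ']
    · simp [h2]
    · rcases fb with _ | f
      · by_cases h1 : PySem.Chars.startswith (PySem.Chars.strip l.toList) ['#', ' ']
        · simp [h2, h1, ih, pvLoop2]
        · simp [h2, h1, ih, pvLoop2]
      · simp [h2, ih]

-- ===== VERDICT (by name: the statement is the Claim_ definition above) =====
theorem default_anchor_py_spec : Claim_equal_default_anchor_py := by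
  intro s _
  show default_anchor_py s = default_anchor_py_alt s
  simp [default_anchor_py, default_anchor_py_alt, pvLoop1_eq, pvLoopB_eq]
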